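-- pv_equiv track=rewrite | github.com/someng2/CodingPractice | Python/best_set.py | solution
-- ===== SOURCE A (Python) =====
-- import math
--
-- def solution(n, s):
--     answer = []
--     multi = 0
--     num = s
--     index = n
--
--     if n > s:
--         return [-1]
--
--     while num > 0:
--         if len(answer) == n-1:
--             answer.append(num)
--             num = 0
--         else:
--             answer.append(math.floor(num/index))
--             num -= math.floor(num/index)
--             index -= 1
--
--     return answer
-- ===== SOURCE B (Python) =====
-- def solution(n, s):
--     if n > s:
--         return [-1]
--     if s <= 0:
--         return []  # here n <= s <= 0: A's loop never runs
--     q, r = divmod(s, n)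
--     return [q] * (n - r) + [q + 1] * r
-- ===== Notes on version B (the rewrite author's own statement) =====
-- stated objective: simpler
-- what changed: Replaces the greedy floor-division loop with the closed form divmod(s, n): n-r copies of q followed by r copies of q+1.
import Mathlib
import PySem

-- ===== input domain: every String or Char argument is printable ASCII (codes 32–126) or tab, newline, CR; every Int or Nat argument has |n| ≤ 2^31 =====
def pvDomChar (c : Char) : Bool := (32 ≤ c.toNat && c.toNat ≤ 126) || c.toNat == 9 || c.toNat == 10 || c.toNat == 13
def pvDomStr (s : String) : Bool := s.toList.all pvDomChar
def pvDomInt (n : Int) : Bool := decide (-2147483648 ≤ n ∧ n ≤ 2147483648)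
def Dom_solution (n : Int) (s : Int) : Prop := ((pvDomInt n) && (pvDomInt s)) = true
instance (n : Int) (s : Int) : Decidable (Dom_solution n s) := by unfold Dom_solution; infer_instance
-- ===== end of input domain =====

-- B replaces A's greedy floor-division loop by the closed form divmod(s, n) (simpler: one division instead of a loop).


-- ===== PORT A =====
-- the while loop of A; fuel is an upper bound on the iterations (each iteration
-- inside Pre_ strictly decreases num); when fuel runs out we return answer (never
-- reached inside Pre_, proved below)
def solutionLoop (fuel : Nat) (n : Int) (answer : List Int) (num : Int) (index : Int) : List Int :=
  match fuel with
  | 0 => answer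
  | fuel + 1 =>
    if num > 0 then
      if (answer.length : Int) = n - 1 then
        solutionLoop fuel n (answer ++ [num]) 0 index
      else
        -- math.floor(num/index) on ints in this domain equals floor division
        let f := PySem.Int.floordiv num index
        solutionLoop fuel n (answer ++ [f]) (num - f) (index - 1)
    else answer

def solution (n : Int) (s : Int) : List Int :=
  if n > s then [-1]
  else solutionLoop (s.toNat + 1) n [] s n

-- ===== PORT B =====
def solution_alt (n : Int) (s : Int) : List Int :=
  if n > s then [-1]
  else if s ≤ 0 then []
  else
    let q := PySem.Int.floordiv s n
    let r := PySem.Int.mod s n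
    List.replicate (n - r).toNat q ++ List.replicate r.toNat (q + 1)

-- ===== PRECONDITION & SPEC =====
-- Pre_ excludes exactly n ≤ 0 ∧ s > 0, where A raises ZeroDivisionError (n = 0)
-- or never terminates (n < 0); A returns normally everywhere else.
def Pre_solution (n : Int) (s : Int) : Prop := s ≤ 0 ∨ 1 ≤ n
instance (n : Int) (s : Int) : Decidable (Pre_solution n s) := by unfold Pre_solution; infer_instance
def pvWitness_solution : Int × Int := (3, 8)

def Spec_solution (n : Int) (s : Int) (out : List Int) : Prop := out = solution_alt n s
instance (n : Int) (s : Int) (out : List Int) : Decidable (Spec_solution n s out) := by unfold Spec_solution; infer_instance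

-- ===== CLAIM (what is proved, stated in full; the proofs are below) =====
def Claim_equal_solution : Prop := ∀ (n : Int) (s : Int), Dom_solution n s → Pre_solution n s → Spec_solution n s (solution n s)

-- ===== LEMMAS AND PROOFS =====

-- the loop returns answer immediately when num = 0 (any positive fuel)
lemma solutionLoop_zero (fuel : Nat) (n : Int) (answer : List Int) (index : Int) :
    solutionLoop fuel n answer 0 index = answer := by
  cases fuel <;> simp [solutionLoop]

-- Main loop invariant: with 1 ≤ index ≤ num, enough fuel and answer already holding
-- n - index elements, the greedy loop appends the evenly-split block for (num, index).
lemma solutionLoop_eq (k : Nat) : ∀ (fuel : Nat) (n : Int) (answer : List Int) (num index : Int),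
    index = (k : Int) → 1 ≤ index → index ≤ num → num.toNat + 1 ≤ fuel →
    (answer.length : Int) = n - index →
    solutionLoop fuel n answer num index =
      answer ++ List.replicate (index - num % index).toNat (num / index)
             ++ List.replicate (num % index).toNat (num / index + 1) := by
  induction k with
  | zero => intro _ _ _ _ _ hk h1 _ _ _; omega
  | succ k ih =>
    intro fuel n answer num index hk h1 hle hfuel hlen
    have hnum : 0 < num := by omega
    obtain ⟨fuel', rfl⟩ : ∃ f', fuel = f' + 1 := ⟨fuel - 1, by omega⟩
    rw [solutionLoop]
    simp only [if_pos hnum]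
    by_cases hone : index = 1
    · subst hone
      rw [if_pos (by omega)]
      rw [solutionLoop_zero]
      simp
    · have hk2 : 1 ≤ k := by omega
      have h2 : (2:Int) ≤ index := by omega
      rw [if_neg (by omega)]
      have hpos : (0:Int) < index := by omega
      rw [PySem.Int.floordiv_eq_ediv_of_pos hpos]
      set q := num / index with hq
      set r := num % index with hr
      have hrb : 0 ≤ r ∧ r < index := ⟨Int.emod_nonneg num (by omega), Int.emod_lt_of_pos num hpos⟩
      have hdecomp : num = q * index + r := by
        rw [hq, hr, Int.mul_comm]; exact (Int.mul_ediv_add_emod num index).symm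
      have hq1 : 1 ≤ q := by
        by_contra h
        push Not at h
        have : q ≤ 0 := by omega
        nlinarith [hrb.1, hrb.2]
      have hnum' : num - q = q * (index - 1) + r := by ring_nf; omega
      have hqnum : q ≤ num := by nlinarith [hrb.1]
      have hle' : index - 1 ≤ num - q := by nlinarith [hrb.1]
      -- recursive call
      rw [ih fuel' n (answer ++ [q]) (num - q) (index - 1)
            (by omega) (by omega) hle'
            (by omega)
            (by simp; omega)]
      have hidx1 : (0:Int) < index - 1 := by omega
      -- compute quotient/remainder of num - q by index - 1
      by_cases hcase : r = index - 1
      · have hdq : (num - q) / (index - 1) = q + 1 := by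
          rw [hnum', hcase]
          rw [show q * (index - 1) + (index - 1) = (q + 1) * (index - 1) by ring]
          exact Int.mul_ediv_cancel _ (by omega)
        have hdr : (num - q) % (index - 1) = 0 := by
          rw [hnum', hcase]
          rw [show q * (index - 1) + (index - 1) = (q + 1) * (index - 1) by ring]
          exact Int.mul_emod_left _ _
        rw [hdq, hdr]
        rw [← hcase]
        have : (index - r).toNat = 1 := by omega
        simp [this, List.replicate_succ]
      · have hrlt : r < index - 1 := by omega
        have hdq : (num - q) / (index - 1) = q := by
          rw [hnum', add_comm, Int.add_mul_ediv_right _ _ (by omega : index - 1 ≠ 0)]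
          rw [Int.ediv_eq_zero_of_lt hrb.1 hrlt]; ring
        have hdr : (num - q) % (index - 1) = r := by
          rw [hnum', add_comm, Int.add_mul_emod_self_right _ _ _]
          exact Int.emod_eq_of_lt hrb.1 hrlt
        rw [hdq, hdr]
        have h1' : (index - 1 - r).toNat + 1 = (index - r).toNat := by omega
        rw [← h1', List.replicate_succ]
        simp

-- ===== VERDICT (by name: the statement is the Claim_ definition above) =====
theorem solution_spec : Claim_equal_solution := by
  intro n s _ hpre
  unfold Spec_solution solution solution_alt
  by_cases hns : n > s
  · simp [hns]
  · rw [if_neg hns, if_neg hns]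
    by_cases hs : s ≤ 0
    · rw [if_pos hs]
      obtain ⟨f, hf⟩ : ∃ f, s.toNat + 1 = f + 1 := ⟨s.toNat, rfl⟩
      rw [hf, solutionLoop]
      simp only [show ¬ (s > 0) by omega, if_false]
    · rw [if_neg hs]
      have hn1 : 1 ≤ n := by rcases hpre with h | h
                             · omega
                             · exact h
      have hpos : (0:Int) < n := by omega
      rw [solutionLoop_eq n.toNat _ n [] s n (by omega) hn1 (by omega) (by omega) (by simp)]
      rw [PySem.Int.floordiv_eq_ediv_of_pos hpos, PySem.Int.mod_eq_emod_of_pos hpos]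
      simp
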